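-- pv_equiv track=rewrite | github.com/morteng/SF4 | scripts/verification/verify_production.py | check_complexity
-- ===== SOURCE A (Python) =====
-- def check_complexity(value, min_length=12):
--     """Check complexity requirements for a string."""
--     checks = [
--         (len(value) >= min_length, f"at least {min_length} characters"),
--         (any(c.isupper() for c in value), "an uppercase letter"),
--         (any(c.islower() for c in value), "a lowercase letter"),
--         (any(c.isdigit() for c in value), "a digit"),
--         (any(c in '!@#$%^&*()_+-=[]{};:,.<>?/"' for c in value), "a special character")
--     ]
--
--     for check, requirement in checks:
--         if not check:
--             return False, requirement
--
--     return True, None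
-- ===== SOURCE B (Python) =====
-- def check_complexity(value, min_length=12):
--     """Check complexity requirements for a string (single pass over value)."""
--     has_upper = has_lower = has_digit = has_special = False
--     for c in value:
--         if c.isupper():
--             has_upper = True
--         if c.islower():
--             has_lower = True
--         if c.isdigit():
--             has_digit = True
--         if c in '!@#$%^&*()_+-=[]{};:,.<>?/"':
--             has_special = True
--     if len(value) < min_length:
--         return False, f"at least {min_length} characters"
--     if not has_upper:
--         return False, "an uppercase letter"
--     if not has_lower:
--         return False, "a lowercase letter"
--     if not has_digit:
--         return False, "a digit"
--     if not has_special: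
--         return False, "a special character"
--     return True, None
-- ===== Notes on version B (the rewrite author's own statement) =====
-- stated objective: alternative
-- what changed: B replaces A's four separate any(...) generator scans plus a checks-table loop with one single pass over the string that accumulates four boolean flags, followed by a plain early-return chain.
import Mathlib
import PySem

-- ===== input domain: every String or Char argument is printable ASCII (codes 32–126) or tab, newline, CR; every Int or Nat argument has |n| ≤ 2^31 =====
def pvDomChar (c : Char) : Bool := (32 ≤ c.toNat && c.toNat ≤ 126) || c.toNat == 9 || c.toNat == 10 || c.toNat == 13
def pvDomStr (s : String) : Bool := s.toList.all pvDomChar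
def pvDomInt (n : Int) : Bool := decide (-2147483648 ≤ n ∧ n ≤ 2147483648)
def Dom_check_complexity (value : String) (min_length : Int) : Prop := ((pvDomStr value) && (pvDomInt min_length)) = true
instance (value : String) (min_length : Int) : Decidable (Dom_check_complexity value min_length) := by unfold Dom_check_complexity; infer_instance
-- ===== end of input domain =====

-- B replaces A's four any(...) scans plus a checks-table loop with one single pass
-- accumulating four boolean flags, followed by an early-return chain (alternative decomposition).


-- the special-character set '!@#$%^&*()_+-=[]{};:,.<>?/"' (shared literal data)
def pvSpecials : List Char := "!@#$%^&*()_+-=[]{};:,.<>?/\"".toList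

-- ===== PORT A =====
-- first (check, requirement) pair whose check is false; (true, none) if all hold
def pvFirstFail : List (Bool × String) → Bool × Option String
  | [] => (true, none)
  | (check, req) :: rest => if !check then (false, some req) else pvFirstFail rest

def check_complexity (value : String) (min_length : Int) : Bool × Option String :=
  let checks : List (Bool × String) := [
    (decide ((value.toList.length : Int) ≥ min_length),
      "at least " ++ PySem.Int.toStr min_length ++ " characters"),
    (value.toList.any (fun c => PySem.Chars.isupper c), "an uppercase letter"),
    (value.toList.any (fun c => PySem.Chars.islower c), "a lowercase letter"),
    (value.toList.any (fun c => PySem.Chars.isdigit c), "a digit"),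
    (value.toList.any (fun c => pvSpecials.contains c), "a special character")]
  pvFirstFail checks

-- ===== PORT B =====
def check_complexity_alt (value : String) (min_length : Int) : Bool × Option String :=
  let flags := value.toList.foldl
    (fun (f : Bool × Bool × Bool × Bool) c =>
      ((if PySem.Chars.isupper c then true else f.1),
       (if PySem.Chars.islower c then true else f.2.1),
       (if PySem.Chars.isdigit c then true else f.2.2.1),
       (if pvSpecials.contains c then true else f.2.2.2)))
    (false, false, false, false)
  if (value.toList.length : Int) < min_length then
    (false, some ("at least " ++ PySem.Int.toStr min_length ++ " characters"))
  else if !flags.1 then (false, some "an uppercase letter")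
  else if !flags.2.1 then (false, some "a lowercase letter")
  else if !flags.2.2.1 then (false, some "a digit")
  else if !flags.2.2.2 then (false, some "a special character")
  else (true, none)

-- ===== PRECONDITION & SPEC =====
def Spec_check_complexity (value : String) (min_length : Int) (out : Bool × Option String) : Prop := out = check_complexity_alt value min_length
instance (value : String) (min_length : Int) (out : Bool × Option String) : Decidable (Spec_check_complexity value min_length out) := by unfold Spec_check_complexity; infer_instance

-- ===== CLAIM (what is proved, stated in full; the proofs are below) =====
def Claim_equal_check_complexity : Prop := ∀ (value : String) (min_length : Int), Dom_check_complexity value min_length → Spec_check_complexity value min_length (check_complexity value min_length)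

-- ===== LEMMAS AND PROOFS =====

-- B's single fold computes exactly the four `any` flags of A
theorem pv_flags_eq (cs : List Char) (a b d s : Bool) :
    cs.foldl
      (fun (f : Bool × Bool × Bool × Bool) c =>
        ((if PySem.Chars.isupper c then true else f.1),
         (if PySem.Chars.islower c then true else f.2.1),
         (if PySem.Chars.isdigit c then true else f.2.2.1),
         (if pvSpecials.contains c then true else f.2.2.2)))
      (a, b, d, s)
    = (a || cs.any (fun c => PySem.Chars.isupper c),
       b || cs.any (fun c => PySem.Chars.islower c),
       d || cs.any (fun c => PySem.Chars.isdigit c),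
       s || cs.any (fun c => pvSpecials.contains c)) := by
  induction cs generalizing a b d s with
  | nil => simp
  | cons c cs ih =>
    simp only [List.foldl_cons, List.any_cons, ih]
    cases PySem.Chars.isupper c <;> cases PySem.Chars.islower c <;>
      cases PySem.Chars.isdigit c <;> cases pvSpecials.contains c <;> simp

-- ===== VERDICT (by name: the statement is the Claim_ definition above) =====
theorem check_complexity_spec : Claim_equal_check_complexity := by
  intro value min_length _
  unfold Spec_check_complexity check_complexity check_complexity_alt
  simp only [pv_flags_eq, Bool.false_or]
  by_cases hlen : (value.toList.length : Int) < min_length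
  · simp [pvFirstFail, not_le.mpr hlen]
  · cases hu : value.toList.any (fun c => PySem.Chars.isupper c) <;>
    cases hl : value.toList.any (fun c => PySem.Chars.islower c) <;>
    cases hd : value.toList.any (fun c => PySem.Chars.isdigit c) <;>
    cases hs : value.toList.any (fun c => pvSpecials.contains c) <;>
      simp [pvFirstFail, hlen, hu, hl, hd, hs]
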